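-- pv_equiv track=rewrite | github.com/bubalis/ae_sysreview | author_work.py | partial_matches
-- ===== SOURCE A (Python) =====
-- def tuple_match(tup1, tup2):
--     return all([t in tup2 for t in tup1])
--
-- def get_keys(tup_of_names, keys):
--     return [k for k in keys if tuple_match(tup_of_names, k)]
--
-- def partial_matches(names, keys, fl):
--     matches={}
--     sub_names=[n for n in names if n[0][0]==fl]
--     sub_keys=[key for key in keys if key[0][0]==fl]
--     for name in sub_names:
--         match=get_keys(name, sub_keys)
--         if match:
--             matches[name]=match
--     return matches
-- ===== SOURCE B (Python) =====
-- def intersect_sorted(xs, ys):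
--     # two-pointer intersection of strictly increasing lists
--     out = []
--     i = j = 0
--     while i < len(xs) and j < len(ys):
--         if xs[i] == ys[j]:
--             out.append(xs[i]); i += 1; j += 1
--         elif xs[i] < ys[j]:
--             i += 1
--         else:
--             j += 1
--     return out
--
-- def partial_matches(names, keys, fl):
--     sub_keys = [key for key in keys if key[0][0] == fl]
--     # inverted index: element -> strictly increasing list of key indices
--     index = {}
--     for i, k in enumerate(sub_keys):
--         for elem in k:
--             lst = index.setdefault(elem, [])
--             if not lst or lst[-1] != i:
--                 lst.append(i)
--     matches = {}
--     for name in names: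
--         if name[0][0] != fl:
--             continue
--         idxs = list(range(len(sub_keys)))
--         for e in name:
--             idxs = intersect_sorted(idxs, index.get(e, []))
--             if not idxs:
--                 break
--         if idxs:
--             matches[name] = [sub_keys[i] for i in idxs]
--     return matches
-- ===== Notes on version B (the rewrite author's own statement) =====
-- stated objective: alternative
-- what changed: Replaces the per-name linear scan over all filtered keys (a membership test per name element per key) with an inverted index element->sorted key-index posting list built once, intersecting posting lists per name with a two-pointer merge and an early exit when the intersection becomes empty.
import Mathlib
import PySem

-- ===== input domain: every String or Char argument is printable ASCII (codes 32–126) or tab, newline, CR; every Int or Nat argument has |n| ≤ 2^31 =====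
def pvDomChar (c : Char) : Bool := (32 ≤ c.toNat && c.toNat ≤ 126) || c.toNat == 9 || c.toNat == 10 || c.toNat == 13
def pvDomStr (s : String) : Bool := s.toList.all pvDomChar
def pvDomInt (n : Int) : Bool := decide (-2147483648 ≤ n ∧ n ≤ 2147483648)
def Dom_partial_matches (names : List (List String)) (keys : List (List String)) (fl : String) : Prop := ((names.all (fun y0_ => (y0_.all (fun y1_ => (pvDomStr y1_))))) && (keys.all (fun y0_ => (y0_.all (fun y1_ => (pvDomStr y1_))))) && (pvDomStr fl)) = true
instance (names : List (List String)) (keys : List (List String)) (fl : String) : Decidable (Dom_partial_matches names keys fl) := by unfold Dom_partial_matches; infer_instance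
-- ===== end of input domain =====

-- B is a different algorithm (inverted index + two-pointer posting-list intersection) proved to
-- return exactly A's dict; Pre_ excludes only inputs where Python A raises IndexError (n[0][0]).

-- shared helper: the Python test 'n[0][0] == fl' (false branches unreachable under Pre_: Python raises there)
def pmFirstIs (n : List String) (fl : String) : Bool :=
  match PySem.List.pyGet? n 0 with
  | none => false
  | some s =>
    match PySem.Str.pyGet? s 0 with
    | none => false
    | some c => fl.toList == [c]

-- ===== PORT A =====
def tuple_match (tup1 tup2 : List String) : Bool :=
  ((tup1.map (fun t => tup2.contains t)).all (fun b => b))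

def get_keys (tup_of_names : List String) (keys : List (List String)) : List (List String) :=
  keys.filter (fun k => tuple_match tup_of_names k)

def partial_matches (names : List (List String)) (keys : List (List String)) (fl : String) : List (List String × List (List String)) :=
  let sub_names := names.filter (fun n => pmFirstIs n fl)
  let sub_keys := keys.filter (fun key => pmFirstIs key fl)
  (sub_names.foldl (fun mtchs name =>
      let mtch := get_keys name sub_keys
      if !mtch.isEmpty then mtchs.insert name mtch else mtchs)
    (PySem.Dict.empty : PySem.Dict (List String) (List (List String)))).items

-- ===== PORT B =====
-- two-pointer intersection of strictly increasing lists (Source B's intersect_sorted, as structural recursion)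
def pmInter : List Int → List Int → List Int
  | [], _ => []
  | _ :: _, [] => []
  | x :: xs, y :: ys =>
    if x = y then x :: pmInter xs ys
    else if x < y then pmInter xs (y :: ys)
    else pmInter (x :: xs) ys

-- the inner 'for elem in k' loop of the index-building phase
def pmAddKey (d : PySem.Dict String (List Int)) (i : Int) (k : List String) : PySem.Dict String (List Int) :=
  k.foldl (fun d elem =>
      let lst := d.getD elem []
      if lst.isEmpty || !(PySem.List.pyGetD lst (-1) 0 == i) then d.insert elem (lst ++ [i])
      else d.insert elem lst)   -- setdefault keeps the key present; re-inserting the same value is a no-op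
    d

-- 'for i, k in enumerate(sub_keys): …'
def pmIndex (sub_keys : List (List String)) : PySem.Dict String (List Int) :=
  (PySem.List.enumerate sub_keys).foldl (fun d p => pmAddKey d p.1 p.2) PySem.Dict.empty

-- 'for e in name: idxs = intersect_sorted(idxs, index.get(e, [])); if not idxs: break'
def pmInterAll (index : PySem.Dict String (List Int)) : List String → List Int → List Int
  | [], idxs => idxs
  | e :: rest, idxs =>
    let idxs' := pmInter idxs (index.getD e [])
    if idxs'.isEmpty then idxs' else pmInterAll index rest idxs'

def partial_matches_alt (names : List (List String)) (keys : List (List String)) (fl : String) : List (List String × List (List String)) :=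
  let sub_keys := keys.filter (fun key => pmFirstIs key fl)
  let index := pmIndex sub_keys
  (names.foldl (fun mtchs name =>
      if !(pmFirstIs name fl) then mtchs
      else
        let idxs := pmInterAll index name (PySem.List.pyRange 0 sub_keys.length 1)
        if idxs.isEmpty then mtchs
        else mtchs.insert name (idxs.map (fun i => PySem.List.pyGetD sub_keys i [])))  -- i always in range
    (PySem.Dict.empty : PySem.Dict (List String) (List (List String)))).items

-- ===== PRECONDITION & SPEC =====
-- Pre_ excludes exactly the inputs on which Python A raises IndexError: a name or key that is the
-- empty tuple or whose first element is the empty string (n[0][0] / key[0][0]).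
def Pre_partial_matches (names : List (List String)) (keys : List (List String)) (fl : String) : Prop :=
  ((names ++ keys).all (fun n =>
    match n.head? with
    | none => false
    | some s => !s.toList.isEmpty)) = true
instance (names : List (List String)) (keys : List (List String)) (fl : String) : Decidable (Pre_partial_matches names keys fl) := by unfold Pre_partial_matches; infer_instance

def pvWitness_partial_matches : List (List String) × List (List String) × String :=
  ([["alice", "b"], ["carol"]], [["alice", "b", "x"], ["bob"]], "a")

def Spec_partial_matches (names : List (List String)) (keys : List (List String)) (fl : String) (out : List (List String × List (List String))) : Prop := out = partial_matches_alt names keys fl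
instance (names : List (List String)) (keys : List (List String)) (fl : String) (out : List (List String × List (List String))) : Decidable (Spec_partial_matches names keys fl out) := by unfold Spec_partial_matches; infer_instance

-- ===== CLAIM (what is proved, stated in full; the proofs are below) =====
def Claim_equal_partial_matches : Prop := ∀ (names : List (List String)) (keys : List (List String)) (fl : String), Dom_partial_matches names keys fl → Pre_partial_matches names keys fl → Spec_partial_matches names keys fl (partial_matches names keys fl)

-- ===== LEMMAS AND PROOFS =====

lemma pmInter_eq_filter : ∀ (xs ys : List Int), xs.Pairwise (· < ·) → ys.Pairwise (· < ·) →
    pmInter xs ys = xs.filter (fun x => ys.contains x) := by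
  intro xs ys
  induction xs, ys using pmInter.induct with
  | case1 ys => intro _ _; simp [pmInter]
  | case2 x xs => intro _ _; simp [pmInter]
  | case3 xs y ys ih =>
    intro hx hy
    rw [List.pairwise_cons] at hx hy
    simp only [pmInter, if_pos rfl]
    rw [ih hx.2 hy.2]
    rw [List.filter_cons]
    have h1 : ((y :: ys).contains y) = true := by simp
    rw [h1]
    simp only [if_true, reduceIte]
    congr 1
    apply List.filter_congr
    intro a ha
    have hax : y < a := hx.1 a ha
    simp only [List.contains_cons]
    have : (a == y) = false := by simp; omega
    simp [this]
  | case4 x xs y ys hne hlt ih =>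
    intro hx hy
    rw [List.pairwise_cons] at hx
    simp only [pmInter, if_neg hne, if_pos hlt]
    rw [ih hx.2 hy]
    simp only [List.filter_cons]
    rw [List.pairwise_cons] at hy
    have : ((y :: ys).contains x) = false := by
      simp only [List.contains_cons, Bool.or_eq_false_iff]
      refine ⟨by simp; omega, ?_⟩
      simp only [List.contains_eq_mem, decide_eq_false_iff_not]
      intro hm; have := hy.1 x hm; omega
    rw [this]
    simp
  | case5 x xs y ys hne hnlt ih =>
    intro hx hy
    rw [List.pairwise_cons] at hy
    simp only [pmInter, if_neg hne, if_neg hnlt]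
    rw [ih hx hy.2]
    apply List.filter_congr
    intro a ha
    have hy' : y < x := by omega
    have hax : x ≤ a := by
      rcases List.mem_cons.mp ha with h | h
      · omega
      · have := (List.pairwise_cons.mp hx).1 a h; omega
    simp only [List.contains_cons]
    have : (a == y) = false := by simp; omega
    simp [this]
lemma pmAddKey_getD (m : Int) (k : List String) :
    ∀ (seen : String → Bool) (base : String → List Int) (d : PySem.Dict String (List Int)),
      (∀ e j, j ∈ base e → j < m) →
      (∀ e, d.getD e [] = base e ++ (if seen e then [m] else [])) →
      ∀ e, (pmAddKey d m k).getD e [] = base e ++ (if seen e || k.contains e then [m] else []) := by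
  induction k with
  | nil => intro seen base d hb hd e; simpa [pmAddKey] using hd e
  | cons e0 k ih =>
    intro seen base d hb hd e
    have hstep : (pmAddKey d m (e0 :: k)) = pmAddKey
        (let lst := d.getD e0 []
         if lst.isEmpty || !(PySem.List.pyGetD lst (-1) 0 == m) then d.insert e0 (lst ++ [m])
         else d.insert e0 lst) m k := rfl
    rw [hstep]
    have hd' : ∀ e, ((let lst := d.getD e0 []
         if lst.isEmpty || !(PySem.List.pyGetD lst (-1) 0 == m) then d.insert e0 (lst ++ [m])
         else d.insert e0 lst)).getD e []
        = base e ++ (if (seen e || (e == e0)) then [m] else []) := by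
      intro e
      by_cases hseen : seen e0 = true
      · have hlst : d.getD e0 [] = base e0 ++ [m] := by rw [hd e0, hseen]; simp
        have hcond : ((d.getD e0 []).isEmpty || !(PySem.List.pyGetD (d.getD e0 []) (-1) 0 == m)) = false := by
          rw [hlst]
          simp [PySem.List.pyGetD_neg_one_append_singleton]
        simp only [hcond]
        simp only [Bool.false_eq_true, if_false]
        rw [PySem.Dict.getD_insert]
        by_cases he : e = e0
        · subst he
          rw [if_pos rfl, hlst]
          have : (seen e || (e == e)) = true := by simp
          rw [this]; simp
        · rw [if_neg he, hd e]
          have : (e == e0) = false := by simpa using he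
          simp [this]
      · have hseen' : seen e0 = false := by simpa using hseen
        have hlst : d.getD e0 [] = base e0 := by rw [hd e0, hseen']; simp
        have hcond : ((d.getD e0 []).isEmpty || !(PySem.List.pyGetD (d.getD e0 []) (-1) 0 == m)) = true := by
          rw [hlst]
          by_cases hnil : base e0 = []
          · simp [hnil]
          · have hlast : PySem.List.pyGetD (base e0) (-1) 0 = (base e0).getLast hnil :=
              PySem.List.pyGetD_neg_one (base e0) 0 hnil
            have hmem := List.getLast_mem hnil
            have hlt := hb e0 _ hmem
            rw [hlast]
            have : ((base e0).getLast hnil == m) = false := by simp; omega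
            simp [this]
        simp only [hcond, if_true, reduceIte]
        rw [PySem.Dict.getD_insert]
        by_cases he : e = e0
        · subst he
          rw [if_pos rfl, hlst]
          have : (seen e || (e == e)) = true := by simp
          rw [this]; simp
        · rw [if_neg he, hd e]
          have : (e == e0) = false := by simpa using he
          simp [this]
    have := ih (fun e => seen e || (e == e0)) base _ hb hd' e
    rw [this]
    have : (seen e || (e == e0) || k.contains e) = (seen e || (e0 :: k).contains e) := by
      by_cases h : e = e0
      · have hbe : (e == e0) = true := by simp [h]
        simp [h, hbe, Bool.or_assoc]
      · have hbe : (e == e0) = false := by simpa using h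
        simp [h, hbe, Bool.or_assoc]
    rw [this]

lemma pmIndex_getD (sub_keys : List (List String)) : ∀ (e : String),
    (pmIndex sub_keys).getD e []
      = (PySem.List.pyRange 0 sub_keys.length 1).filter
          (fun i => (PySem.List.pyGetD sub_keys i []).contains e) := by
  induction sub_keys using List.reverseRecOn with
  | nil => intro e; simp [pmIndex, PySem.List.enumerate, PySem.List.pyRange_zero]
  | append_singleton l k ih =>
    intro e
    have hstep : pmIndex (l ++ [k]) = pmAddKey (pmIndex l) (l.length : Int) k := by
      unfold pmIndex
      rw [PySem.List.enumerate_append, List.foldl_append]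
      simp [PySem.List.enumerate_cons, PySem.List.enumerate_nil]
    rw [hstep]
    have hmain := pmAddKey_getD (l.length : Int) k (fun _ => false)
      (fun e => (PySem.List.pyRange 0 l.length 1).filter
          (fun i => (PySem.List.pyGetD l i []).contains e))
      (pmIndex l)
      (by
        intro e j hj
        have := (List.mem_filter.mp hj).1
        have := (PySem.List.mem_pyRange_one).mp this
        omega)
      (by intro e'; rw [ih e']; simp)
      e
    rw [hmain]
    have hlen : ((l ++ [k]).length : Int) = (l.length : Int) + 1 := by simp
    rw [hlen, PySem.List.pyRange_one_succ_right (by positivity), List.filter_append]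
    congr 1
    · apply List.filter_congr
      intro i hi
      have hmem := PySem.List.mem_pyRange_one.mp hi
      have h1 : PySem.List.pyGetD (l ++ [k]) i [] = PySem.List.pyGetD l i [] := by
        rw [PySem.List.pyGetD_eq_getElem _ _ hmem.1 (by simp; omega),
            PySem.List.pyGetD_eq_getElem _ _ hmem.1 (by omega)]
        rw [List.getElem_append_left (by omega)]
      rw [h1]
    · have h2 : PySem.List.pyGetD (l ++ [k]) (l.length : Int) [] = k := by
        rw [PySem.List.pyGetD_eq_getElem _ _ (by positivity) (by simp)]
        simp
      simp only [List.filter_cons, List.filter_nil, h2, Bool.false_or]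

lemma pmInterAll_eq (sub_keys : List (List String)) :
    ∀ (es : List String) (q : Int → Bool),
      pmInterAll (pmIndex sub_keys) es ((PySem.List.pyRange 0 sub_keys.length 1).filter q)
        = (PySem.List.pyRange 0 sub_keys.length 1).filter
            (fun i => q i && es.all (fun e => (PySem.List.pyGetD sub_keys i []).contains e)) := by
  intro es
  induction es with
  | nil => intro q; simp [pmInterAll]
  | cons e rest ih =>
    intro q
    set R := PySem.List.pyRange 0 (sub_keys.length : Int) 1 with hR
    have hpw : R.Pairwise (· < ·) := PySem.List.pairwise_lt_pyRange_one 0 _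
    have hidx : pmInter (R.filter q) ((pmIndex sub_keys).getD e [])
        = R.filter (fun i => q i && (PySem.List.pyGetD sub_keys i []).contains e) := by
      rw [pmIndex_getD sub_keys e]
      rw [pmInter_eq_filter _ _ (hpw.filter q) (hpw.filter _)]
      rw [List.filter_filter]
      apply List.filter_congr
      intro a ha
      by_cases hq : q a = true
      · simp only [hq, Bool.true_and]
        by_cases hc : (PySem.List.pyGetD sub_keys a []).contains e = true
        · have : a ∈ R.filter (fun i => (PySem.List.pyGetD sub_keys i []).contains e) :=
            List.mem_filter.mpr ⟨ha, hc⟩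
          simp [hc, this, ha]
        · have : a ∉ R.filter (fun i => (PySem.List.pyGetD sub_keys i []).contains e) := by
            intro hmem; exact hc (List.mem_filter.mp hmem).2
          simp at hc
          simp [hc, this]
      · simp at hq; simp [hq]
    show (if (pmInter (R.filter q) ((pmIndex sub_keys).getD e [])).isEmpty = true
          then pmInter (R.filter q) ((pmIndex sub_keys).getD e [])
          else pmInterAll (pmIndex sub_keys) rest (pmInter (R.filter q) ((pmIndex sub_keys).getD e []))) = _
    rw [hidx]
    by_cases hemp : (R.filter (fun i => q i && (PySem.List.pyGetD sub_keys i []).contains e)).isEmpty = true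
    · rw [if_pos hemp]
      rw [List.isEmpty_iff] at hemp
      rw [hemp]
      symm
      rw [List.filter_eq_nil_iff] at hemp ⊢
      intro a ha hcond
      apply hemp a ha
      simp only [List.all_cons, Bool.and_eq_true] at hcond ⊢
      exact ⟨hcond.1, hcond.2.1⟩
    · rw [if_neg hemp]
      rw [ih (fun i => q i && (PySem.List.pyGetD sub_keys i []).contains e)]
      apply List.filter_congr
      intro a _
      simp [Bool.and_assoc]

lemma map_filter_range_getD_nat {α : Type} (p : α → Bool) (d : α) :
    ∀ (xs : List α),
      (((List.range xs.length).filter (fun i => p (xs.getD i d))).map (fun i => xs.getD i d))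
        = xs.filter p := by
  intro xs
  induction xs with
  | nil => simp
  | cons x xs ih =>
    have hr : List.range (x :: xs).length = 0 :: (List.range xs.length).map Nat.succ := by
      simpa using (List.range_succ_eq_map (n := xs.length))
    rw [hr]
    rw [List.filter_cons]
    by_cases hp : p ((x :: xs).getD 0 d) = true
    · rw [if_pos hp]
      rw [List.map_cons]
      simp only [List.getD_cons_zero] at hp ⊢
      rw [List.filter_map, List.map_map, List.filter_cons, if_pos hp]
      have hcomp1 : ((fun i => p ((x :: xs).getD i d)) ∘ Nat.succ) = (fun i => p (xs.getD i d)) := by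
        funext i; simp
      have hcomp2 : ((fun i => (x :: xs).getD i d) ∘ Nat.succ) = (fun i => xs.getD i d) := by
        funext i; simp
      rw [hcomp1, hcomp2, ih]
    · rw [if_neg hp]
      simp only [List.getD_cons_zero] at hp
      rw [List.filter_map, List.map_map, List.filter_cons, if_neg hp]
      have hcomp1 : ((fun i => p ((x :: xs).getD i d)) ∘ Nat.succ) = (fun i => p (xs.getD i d)) := by
        funext i; simp
      have hcomp2 : ((fun i => (x :: xs).getD i d) ∘ Nat.succ) = (fun i => xs.getD i d) := by
        funext i; simp
      rw [hcomp1, hcomp2, ih]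

lemma map_filter_range_getD (xs : List (List String)) (p : List String → Bool) :
    (((PySem.List.pyRange 0 xs.length 1).filter (fun i => p (PySem.List.pyGetD xs i []))).map
        (fun i => PySem.List.pyGetD xs i [])) = xs.filter p := by
  have hr : PySem.List.pyRange 0 (xs.length : Int) 1 = List.map (fun k : Nat => (k : Int)) (List.range xs.length) := by
    rw [PySem.List.pyRange_one]
    have h0 : ((xs.length : Int) - 0).toNat = xs.length := by simp
    rw [h0]
    apply List.map_congr_left
    intro k _
    omega
  rw [hr, List.filter_map, List.map_map]
  have hcomp1 : ((fun i => p (PySem.List.pyGetD xs i [])) ∘ (fun k : Nat => (k : Int)))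
      = (fun k : Nat => p (xs.getD k [])) := by
    funext k; simp [PySem.List.pyGetD_natCast]
  have hcomp2 : ((fun i => PySem.List.pyGetD xs i []) ∘ (fun k : Nat => (k : Int)))
      = (fun k : Nat => xs.getD k []) := by
    funext k; simp [PySem.List.pyGetD_natCast]
  rw [hcomp1, hcomp2]
  exact map_filter_range_getD_nat p [] xs

lemma central (sub_keys : List (List String)) (name : List String) :
    (pmInterAll (pmIndex sub_keys) name (PySem.List.pyRange 0 sub_keys.length 1)).map
        (fun i => PySem.List.pyGetD sub_keys i [])
      = get_keys name sub_keys := by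
  have h0 : PySem.List.pyRange 0 (sub_keys.length : Int) 1
      = (PySem.List.pyRange 0 (sub_keys.length : Int) 1).filter (fun _ => true) := by
    simp
  rw [h0, pmInterAll_eq sub_keys name (fun _ => true)]
  have h1 : (PySem.List.pyRange 0 (sub_keys.length : Int) 1).filter
        (fun i => true && name.all (fun e => (PySem.List.pyGetD sub_keys i []).contains e))
      = (PySem.List.pyRange 0 (sub_keys.length : Int) 1).filter
        (fun i => tuple_match name (PySem.List.pyGetD sub_keys i [])) := by
    apply List.filter_congr
    intro a _
    simp [tuple_match, List.all_map, Function.comp_def]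
  rw [h1, map_filter_range_getD sub_keys (fun k => tuple_match name k)]
  rfl

lemma pm_ports_eq : ∀ (names keys : List (List String)) (fl : String),
    partial_matches names keys fl = partial_matches_alt names keys fl := by
  intro names keys fl
  simp only [partial_matches, partial_matches_alt]
  congr 1
  rw [List.foldl_filter]
  congr 1
  funext m name
  by_cases hp : pmFirstIs name fl = true
  · simp only [hp, if_true, Bool.not_true, Bool.false_eq_true, if_false]
    have hc := central (keys.filter (fun key => pmFirstIs key fl)) name
    set sk := keys.filter (fun key => pmFirstIs key fl) with hsk
    set idxs := pmInterAll (pmIndex sk) name (PySem.List.pyRange 0 sk.length 1) with hidxs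
    have hemp : (get_keys name sk).isEmpty = idxs.isEmpty := by
      rw [← hc]; simp
    by_cases he : idxs.isEmpty = true
    · rw [he] at hemp
      simp [hemp, he]
    · have he' : idxs.isEmpty = false := by simpa using he
      rw [he'] at hemp
      simp [hemp, he', hc]
  · have hp' : pmFirstIs name fl = false := by simpa using hp
    simp [hp']

-- ===== VERDICT (by name: the statement is the Claim_ definition above) =====
theorem partial_matches_spec : Claim_equal_partial_matches := by
  intro names keys fl _ _
  unfold Spec_partial_matches
  exact pm_ports_eq names keys fl
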